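-- pv_equiv track=rewrite | github.com/Mrunal321/Folded_Bias-Decomposition | final_generator.py | _collect_const_names
-- ===== SOURCE A (Python) =====
-- def _collect_const_names(fa_ops, maj_signal, candidates):
--     used = set()
--     candidate_set = set(candidates or [])
--     for a, b, cin, s, k in fa_ops:
--         for sig in (a, b, cin, s, k):
--             if sig in candidate_set:
--                 used.add(sig)
--     if maj_signal in candidate_set:
--         used.add(maj_signal)
--     return sorted(used)
-- ===== SOURCE B (Python) =====
-- def _collect_const_names(fa_ops, maj_signal, candidates):
--     rows = [(a, b, cin, s, k) for a, b, cin, s, k in fa_ops]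
--     return sorted(c for c in set(candidates or [])
--                   if c == maj_signal or any(c in row for row in rows))
-- ===== Notes on version B (the rewrite author's own statement) =====
-- stated objective: simpler
-- what changed: B inverts the scan: instead of A's signal-major nested loop that conditionally grows a result set, B deduplicates the candidates once and keeps each candidate by a single membership test against the rows (and maj_signal).
import Mathlib
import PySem

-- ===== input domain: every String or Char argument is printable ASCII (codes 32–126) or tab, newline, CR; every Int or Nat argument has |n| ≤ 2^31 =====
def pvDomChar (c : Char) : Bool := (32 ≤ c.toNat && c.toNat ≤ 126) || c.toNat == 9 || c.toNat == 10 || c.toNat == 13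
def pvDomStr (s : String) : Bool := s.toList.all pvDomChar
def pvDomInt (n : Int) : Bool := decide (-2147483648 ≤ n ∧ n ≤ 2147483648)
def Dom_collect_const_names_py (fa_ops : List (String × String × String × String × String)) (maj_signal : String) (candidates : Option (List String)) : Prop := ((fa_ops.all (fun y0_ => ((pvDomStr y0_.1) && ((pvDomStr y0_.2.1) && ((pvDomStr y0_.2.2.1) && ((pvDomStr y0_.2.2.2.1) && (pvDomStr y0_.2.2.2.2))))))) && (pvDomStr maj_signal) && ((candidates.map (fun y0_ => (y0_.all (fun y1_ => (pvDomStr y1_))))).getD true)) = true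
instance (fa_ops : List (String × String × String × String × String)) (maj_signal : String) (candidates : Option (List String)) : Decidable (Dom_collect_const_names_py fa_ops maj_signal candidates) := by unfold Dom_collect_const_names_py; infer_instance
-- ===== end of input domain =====

-- B inverts the scan: it deduplicates the candidates once and keeps each candidate by a single membership test against the rows and maj_signal (simpler decomposition).
-- ===== PORT A =====
def collect_const_names_py (fa_ops : List (String × String × String × String × String)) (maj_signal : String) (candidates : Option (List String)) : List String :=
  let candidate_set : PySem.Set String := PySem.Set.ofList (candidates.getD [])
  let used : PySem.Set String :=
    fa_ops.foldl (fun used t =>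
      [t.1, t.2.1, t.2.2.1, t.2.2.2.1, t.2.2.2.2].foldl
        (fun u sig => if PySem.Set.contains candidate_set sig then PySem.Set.add u sig else u) used)
      PySem.Set.empty
  let used := if PySem.Set.contains candidate_set maj_signal then PySem.Set.add used maj_signal else used
  PySem.List.sorted used (fun x => x) false

-- ===== PORT B =====
def collect_const_names_py_alt (fa_ops : List (String × String × String × String × String)) (maj_signal : String) (candidates : Option (List String)) : List String :=
  let rows := fa_ops.map (fun t => (t.1, t.2.1, t.2.2.1, t.2.2.2.1, t.2.2.2.2))
  PySem.List.sorted
    ((PySem.Set.ofList (candidates.getD [])).filter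
      (fun c => c == maj_signal ||
        rows.any (fun r => c == r.1 || c == r.2.1 || c == r.2.2.1 || c == r.2.2.2.1 || c == r.2.2.2.2)))
    (fun x => x) false

-- ===== PRECONDITION & SPEC =====
def Spec_collect_const_names_py (fa_ops : List (String × String × String × String × String)) (maj_signal : String) (candidates : Option (List String)) (out : List String) : Prop := out = collect_const_names_py_alt fa_ops maj_signal candidates
instance (fa_ops : List (String × String × String × String × String)) (maj_signal : String) (candidates : Option (List String)) (out : List String) : Decidable (Spec_collect_const_names_py fa_ops maj_signal candidates out) := by unfold Spec_collect_const_names_py; infer_instance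

-- ===== CLAIM (what is proved, stated in full; the proofs are below) =====
def Claim_equal_collect_const_names_py : Prop := ∀ (fa_ops : List (String × String × String × String × String)) (maj_signal : String) (candidates : Option (List String)), Dom_collect_const_names_py fa_ops maj_signal candidates → Spec_collect_const_names_py fa_ops maj_signal candidates (collect_const_names_py fa_ops maj_signal candidates)

-- ===== LEMMAS AND PROOFS =====

-- membership in A's inner 5-signal fold
theorem memA_inner (cand : PySem.Set String) (sigs : List String) (u : PySem.Set String) (x : String) :
    x ∈ sigs.foldl (fun u sig => if PySem.Set.contains cand sig then PySem.Set.add u sig else u) u ↔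
      x ∈ u ∨ (x ∈ sigs ∧ x ∈ cand) := by
  induction sigs generalizing u with
  | nil => simp
  | cons s rest ih =>
    rw [List.foldl_cons, ih]
    simp only [List.mem_cons]
    split_ifs with hc
    · simp only [PySem.Set.mem_add]
      constructor
      · rintro ((h | rfl) | h)
        · exact Or.inl h
        · exact Or.inr ⟨Or.inl rfl, (PySem.Set.contains_iff _ _).1 hc⟩
        · exact Or.inr ⟨Or.inr h.1, h.2⟩
      · rintro (h | ⟨(rfl | hm), hx⟩)
        · exact Or.inl (Or.inl h)
        · exact Or.inl (Or.inr rfl)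
        · exact Or.inr ⟨hm, hx⟩
    · constructor
      · rintro (h | h)
        · exact Or.inl h
        · exact Or.inr ⟨Or.inr h.1, h.2⟩
      · rintro (h | ⟨(rfl | hm), hx⟩)
        · exact Or.inl h
        · exact absurd ((PySem.Set.contains_iff _ _).2 hx) (by simpa using hc)
        · exact Or.inr ⟨hm, hx⟩

theorem nodupA_inner (cand : PySem.Set String) (sigs : List String) (u : PySem.Set String) (hu : u.Nodup) :
    (sigs.foldl (fun u sig => if PySem.Set.contains cand sig then PySem.Set.add u sig else u) u).Nodup := by
  induction sigs generalizing u with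
  | nil => exact hu
  | cons s rest ih =>
    rw [List.foldl_cons]
    apply ih
    split_ifs
    · exact PySem.Set.nodup_add _ _ hu
    · exact hu

-- membership in A's outer fold
theorem memA_outer (cand : PySem.Set String)
    (fa_ops : List (String × String × String × String × String)) (u : PySem.Set String) (x : String) :
    x ∈ fa_ops.foldl (fun used t =>
        [t.1, t.2.1, t.2.2.1, t.2.2.2.1, t.2.2.2.2].foldl
          (fun u sig => if PySem.Set.contains cand sig then PySem.Set.add u sig else u) used) u ↔
      x ∈ u ∨ ((∃ t ∈ fa_ops, x ∈ [t.1, t.2.1, t.2.2.1, t.2.2.2.1, t.2.2.2.2]) ∧ x ∈ cand) := by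
  induction fa_ops generalizing u with
  | nil => simp
  | cons t rest ih =>
    rw [List.foldl_cons, ih, memA_inner]
    constructor
    · rintro ((h | h) | ⟨⟨t', ht', hx⟩, hc⟩)
      · exact Or.inl h
      · exact Or.inr ⟨⟨t, List.mem_cons_self, h.1⟩, h.2⟩
      · exact Or.inr ⟨⟨t', List.mem_cons_of_mem _ ht', hx⟩, hc⟩
    · rintro (h | ⟨⟨t', ht', hx⟩, hc⟩)
      · exact Or.inl (Or.inl h)
      · rcases List.mem_cons.1 ht' with rfl | ht'
        · exact Or.inl (Or.inr ⟨hx, hc⟩)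
        · exact Or.inr ⟨⟨t', ht', hx⟩, hc⟩

theorem nodupA_outer (cand : PySem.Set String)
    (fa_ops : List (String × String × String × String × String)) (u : PySem.Set String) (hu : u.Nodup) :
    (fa_ops.foldl (fun used t =>
        [t.1, t.2.1, t.2.2.1, t.2.2.2.1, t.2.2.2.2].foldl
          (fun u sig => if PySem.Set.contains cand sig then PySem.Set.add u sig else u) used) u).Nodup := by
  induction fa_ops generalizing u with
  | nil => exact hu
  | cons t rest ih =>
    rw [List.foldl_cons]
    exact ih _ (nodupA_inner _ _ _ hu)

-- B's selection predicate, characterised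
theorem predB (fa_ops : List (String × String × String × String × String)) (maj_signal x : String) :
    (x == maj_signal ||
      (fa_ops.map (fun t => (t.1, t.2.1, t.2.2.1, t.2.2.2.1, t.2.2.2.2))).any
        (fun r => x == r.1 || x == r.2.1 || x == r.2.2.1 || x == r.2.2.2.1 || x == r.2.2.2.2)) = true ↔
      x = maj_signal ∨ ∃ t ∈ fa_ops, x ∈ [t.1, t.2.1, t.2.2.1, t.2.2.2.1, t.2.2.2.2] := by
  simp only [Bool.or_eq_true, beq_iff_eq, List.any_eq_true, List.mem_map]
  constructor
  · rintro (rfl | ⟨r, ⟨t, ht, rfl⟩, h⟩)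
    · exact Or.inl rfl
    · refine Or.inr ⟨t, ht, ?_⟩
      simp only [List.mem_cons, List.not_mem_nil, or_false]
      tauto
  · rintro (rfl | ⟨t, ht, h⟩)
    · exact Or.inl rfl
    · refine Or.inr ⟨_, ⟨t, ht, rfl⟩, ?_⟩
      simp only [List.mem_cons, List.not_mem_nil, or_false] at h
      tauto

-- ===== VERDICT (by name: the statement is the Claim_ definition above) =====
theorem collect_const_names_py_spec : Claim_equal_collect_const_names_py := by
  intro fa_ops maj_signal candidates _hdom
  unfold Spec_collect_const_names_py collect_const_names_py collect_const_names_py_alt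
  refine PySem.List.sorted_eq_sorted_of_perm _ _ _ (fun a b h => h) ?_
  refine (List.perm_ext_iff_of_nodup ?_ ?_).2 ?_
  · split_ifs
    · exact PySem.Set.nodup_add _ _ (nodupA_outer _ _ _ List.nodup_nil)
    · exact nodupA_outer _ _ _ List.nodup_nil
  · exact List.Nodup.filter _ (PySem.Set.nodup_ofList _)
  · intro x
    split_ifs with hm
    · simp only [PySem.Set.mem_add, memA_outer, List.mem_filter, predB,
        PySem.Set.mem_ofList, PySem.Set.empty, List.not_mem_nil, false_or]
      have hmem : maj_signal ∈ candidates.getD [] := by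
        simpa [PySem.Set.mem_ofList] using (PySem.Set.contains_iff _ _).1 hm
      constructor
      · rintro (⟨he, hc⟩ | rfl)
        · exact ⟨hc, Or.inr he⟩
        · exact ⟨hmem, Or.inl rfl⟩
      · rintro ⟨hc, (rfl | he)⟩
        · exact Or.inr rfl
        · exact Or.inl ⟨he, hc⟩
    · simp only [memA_outer, List.mem_filter, predB,
        PySem.Set.mem_ofList, PySem.Set.empty, List.not_mem_nil, false_or]
      have hmem : maj_signal ∉ candidates.getD [] := fun hin =>
        hm ((PySem.Set.contains_iff _ _).2 (by simpa [PySem.Set.mem_ofList] using hin))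
      constructor
      · rintro ⟨he, hc⟩
        exact ⟨hc, Or.inr he⟩
      · rintro ⟨hc, (rfl | he)⟩
        · exact absurd hc hmem
        · exact ⟨he, hc⟩
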